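-- pv_equiv track=rewrite | github.com/River-Du/PeckTeX | src/gui.py | _filter_newlines
-- ===== SOURCE A (Python) =====
-- def _filter_newlines(chunk: str, last_char: str) -> tuple[str, str]:
--     filtered = []
--     prev_char = last_char
--     for char in chunk:
--         if not (char == '\n' and prev_char == '\n'):
--             filtered.append(char)
--         prev_char = char
--     return "".join(filtered), prev_char
-- ===== SOURCE B (Python) =====
-- def _filter_newlines(chunk: str, last_char: str) -> tuple[str, str]:
--     # Staged split/join algorithm: prepend a newline marker when the carried
--     # state is a newline, split on '\n' (runs of newlines show up as empty
--     # pieces), keep the first and last pieces and only the non-empty middle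
--     # pieces, and rejoin with single newlines; finally strip the marker.
--     combined = ('\n' if last_char == '\n' else '') + chunk
--     parts = combined.split('\n')
--     kept = parts[:1] + [p for p in parts[1:-1] if p] + parts[1:][-1:]
--     out = '\n'.join(kept)
--     if last_char == '\n':
--         out = out[1:]
--     return out, (chunk[-1] if chunk else last_char)
-- ===== Notes on version B (the rewrite author's own statement) =====
-- stated objective: faster
-- what changed: Replaces A's single character-by-character pass with carried prev_char state by a staged split/join algorithm: split the (marker-prefixed) chunk on '\n' so newline runs appear as empty pieces, keep the first and last pieces plus only non-empty middle pieces, rejoin with single newlines, and read the trailing state directly from the chunk end.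
import Mathlib
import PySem

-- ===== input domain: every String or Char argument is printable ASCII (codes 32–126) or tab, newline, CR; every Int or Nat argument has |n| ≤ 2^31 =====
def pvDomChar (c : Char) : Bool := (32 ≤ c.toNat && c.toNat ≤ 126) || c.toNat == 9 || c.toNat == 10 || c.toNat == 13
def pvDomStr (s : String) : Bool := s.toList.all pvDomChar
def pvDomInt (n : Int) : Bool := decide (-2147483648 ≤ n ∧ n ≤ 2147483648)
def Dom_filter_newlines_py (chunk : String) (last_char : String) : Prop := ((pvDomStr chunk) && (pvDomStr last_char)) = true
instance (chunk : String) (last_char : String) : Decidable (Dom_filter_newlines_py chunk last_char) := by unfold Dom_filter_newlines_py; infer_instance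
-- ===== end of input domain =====

-- B replaces A's stateful character loop by a staged split-on-newline / filter / rejoin algorithm; objective: faster (measured).

-- ===== PORT A =====
-- for char in chunk: if not (char == '\n' and prev_char == '\n'): filtered.append(char); prev_char = char
def filter_newlines_py (chunk : String) (last_char : String) : String × String :=
  let st := chunk.toList.foldl
    (fun (st : List Char × String) c =>
      ((if ¬(c = '\n' ∧ st.2 = "\n") then st.1 ++ [c] else st.1), String.ofList [c]))
    ([], last_char)
  (String.ofList st.1, st.2)

-- ===== PORT B =====
-- parts = combined.split('\n'); kept = parts[:1] + [p for p in parts[1:-1] if p] + parts[1:][-1:]; '\n'.join(kept)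
def pvJoinKept (ds : List Char) : List Char :=
  let parts := ds.splitOn '\n'
  let kept := parts.take 1 ++ (parts.drop 1).dropLast.filter (fun p => !p.isEmpty)
                ++ ((parts.drop 1).getLast?).toList
  List.intercalate ['\n'] kept

-- combined = ('\n' if last_char == '\n' else '') + chunk; out = joined kept pieces; strip the marker; tail = chunk[-1] if chunk else last_char
def filter_newlines_py_alt (chunk : String) (last_char : String) : String × String :=
  let combined := (if last_char = "\n" then ['\n'] else []) ++ chunk.toList
  let out := pvJoinKept combined
  let out := if last_char = "\n" then out.drop 1 else out
  (String.ofList out,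
   match chunk.toList.getLast? with
   | some c => String.ofList [c]
   | none => last_char)

-- ===== PRECONDITION & SPEC =====
def Spec_filter_newlines_py (chunk : String) (last_char : String) (out : String × String) : Prop := out = filter_newlines_py_alt chunk last_char
instance (chunk : String) (last_char : String) (out : String × String) : Decidable (Spec_filter_newlines_py chunk last_char out) := by unfold Spec_filter_newlines_py; infer_instance

-- ===== CLAIM (what is proved, stated in full; the proofs are below) =====
def Claim_equal_filter_newlines_py : Prop := ∀ (chunk : String) (last_char : String), Dom_filter_newlines_py chunk last_char → Spec_filter_newlines_py chunk last_char (filter_newlines_py chunk last_char)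

-- ===== LEMMAS AND PROOFS =====

-- the collapsed character list, as a structural recursion with the "previous char was a newline" flag
def pvColl : List Char → Bool → List Char
  | [], _ => []
  | c :: t, b => (if c = '\n' ∧ b = true then [] else [c]) ++ pvColl t (c == '\n')

lemma pvMk_eq_nl (c : Char) : (String.ofList [c] = "\n") ↔ c = '\n' := by
  constructor
  · intro h
    have h2 := congrArg String.toList h
    rw [String.toList_ofList] at h2
    have h3 : ("\n" : String).toList = ['\n'] := by decide
    rw [h3] at h2
    simpa using h2
  · intro h; subst h; decide

-- the second component of A's fold state after the loop
def pvLastState (cs : List Char) (p : String) : String :=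
  match cs.getLast? with
  | some c => String.ofList [c]
  | none => p

lemma pvLastState_cons (a : Char) (rest : List Char) (p : String) :
    pvLastState (a :: rest) p = pvLastState rest (String.ofList [a]) := by
  cases rest with
  | nil => simp [pvLastState]
  | cons b t =>
      cases hl : (b :: t).getLast? with
      | none => simp at hl
      | some x => simp [pvLastState, List.getLast?_cons_cons, hl]

lemma pvFoldA_eq (cs : List Char) (p : String) (acc : List Char) :
    cs.foldl
      (fun (st : List Char × String) c =>
        ((if ¬(c = '\n' ∧ st.2 = "\n") then st.1 ++ [c] else st.1), String.ofList [c]))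
      (acc, p)
      = (acc ++ pvColl cs (decide (p = "\n")), pvLastState cs p) := by
  induction cs generalizing p acc with
  | nil => simp [pvColl, pvLastState]
  | cons c rest ih =>
      simp only [List.foldl_cons, ih, pvLastState_cons]
      by_cases h1 : c = '\n'
      · subst h1
        by_cases h2 : p = "\n" <;>
          simp [pvColl, h2, List.append_assoc]
      · by_cases h2 : p = "\n" <;>
          simp [pvColl, h1, h2, pvMk_eq_nl, List.append_assoc,
                show (c == '\n') = false from by simp [h1]]

lemma pvSplit_ne_nil (ds : List Char) : ds.splitOn '\n' ≠ [] := by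
  simp [List.splitOn]
  exact List.splitOnP_ne_nil _ _

lemma pvSplit_cons_nl (t : List Char) : ('\n' :: t).splitOn '\n' = [] :: t.splitOn '\n' := by
  simp [List.splitOn, List.splitOnP_cons]

lemma pvSplit_cons (c : Char) (hc : c ≠ '\n') (t : List Char) :
    (c :: t).splitOn '\n' = (t.splitOn '\n').modifyHead (c :: ·) := by
  simp [List.splitOn, List.splitOnP_cons, hc]

lemma pvInterc_cons (c : Char) (p : List Char) (Z : List (List Char)) :
    List.intercalate ['\n'] ((c :: p) :: Z) = c :: List.intercalate ['\n'] (p :: Z) := by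
  cases Z <;> simp [List.intercalate]

lemma pvInterc_nil_cons (q : List Char) (Z : List (List Char)) :
    List.intercalate ['\n'] ([] :: q :: Z) = '\n' :: List.intercalate ['\n'] (q :: Z) := by
  simp [List.intercalate]

lemma pvJK_cons (c : Char) (hc : c ≠ '\n') (t : List Char) :
    pvJoinKept (c :: t) = c :: pvJoinKept t := by
  cases h : t.splitOn '\n' with
  | nil => exact absurd h (pvSplit_ne_nil t)
  | cons p r =>
      simp [pvJoinKept, pvSplit_cons c hc, h, pvInterc_cons]

lemma pvJK_nl_cons (c : Char) (hc : c ≠ '\n') (t : List Char) :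
    pvJoinKept ('\n' :: c :: t) = '\n' :: pvJoinKept (c :: t) := by
  cases h : t.splitOn '\n' with
  | nil => exact absurd h (pvSplit_ne_nil t)
  | cons p r =>
      cases r with
      | nil =>
          simp [pvJoinKept, pvSplit_cons_nl, pvSplit_cons c hc, h,
                List.intercalate]
      | cons q r' =>
          simp [pvJoinKept, pvSplit_cons_nl, pvSplit_cons c hc, h, pvInterc_nil_cons,
                pvInterc_cons]

lemma pvJK_nl_nl (t : List Char) :
    pvJoinKept ('\n' :: '\n' :: t) = pvJoinKept ('\n' :: t) := by
  cases h : t.splitOn '\n' with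
  | nil => exact absurd h (pvSplit_ne_nil t)
  | cons p r =>
      cases r with
      | nil => simp [pvJoinKept, pvSplit_cons_nl, h]
      | cons q r' => simp [pvJoinKept, pvSplit_cons_nl, h]

lemma pvJK_pair (cs : List Char) :
    pvJoinKept cs = pvColl cs false ∧ pvJoinKept ('\n' :: cs) = '\n' :: pvColl cs true := by
  induction cs with
  | nil => constructor <;> decide
  | cons c t ih =>
      by_cases hc : c = '\n'
      · subst hc
        refine ⟨?_, ?_⟩
        · rw [ih.2]; simp [pvColl]
        · rw [pvJK_nl_nl, ih.2]; simp [pvColl]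
      · refine ⟨?_, ?_⟩
        · rw [pvJK_cons c hc, ih.1]
          simp [pvColl, hc, show (c == '\n') = false from by simp [hc]]
        · rw [pvJK_nl_cons c hc, pvJK_cons c hc, ih.1]
          simp [pvColl, hc, show (c == '\n') = false from by simp [hc]]

-- ===== VERDICT (by name: the statement is the Claim_ definition above) =====
theorem filter_newlines_py_spec : Claim_equal_filter_newlines_py := by
  intro chunk last_char _
  unfold Spec_filter_newlines_py filter_newlines_py filter_newlines_py_alt
  rw [pvFoldA_eq]
  by_cases hl : last_char = "\n" <;>
    cases hgl : chunk.toList.getLast? <;>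
      simp [hl, hgl, pvLastState, (pvJK_pair chunk.toList).1, (pvJK_pair chunk.toList).2]
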